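-- pv_equiv track=rewrite | github.com/okyungjin/ALGORITHM | 이코테/DFS_BFS/유형별/괄호_변환/solution.py | get_balanced_index
-- ===== SOURCE A (Python) =====
-- def get_balanced_index(p):
--     n_left_bracket = 0
--     for i in range(len(p)):
--         if p[i] == '(':
--             n_left_bracket += 1
--         else:
--             n_left_bracket -= 1
--         if n_left_bracket == 0:
--             return i
-- ===== SOURCE B (Python) =====
-- def get_balanced_index(p):
--     # Brute-force candidate check: the balance can only be zero after an even number
--     # of characters, so test each odd index i and recount '(' in p[:i+1] from scratch
--     # (2 * #'(' == i+1 iff the prefix is balanced).  No running counter is kept.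
--     for i in range(1, len(p), 2):
--         if 2 * p.count('(', 0, i + 1) == i + 1:
--             return i
-- ===== Notes on version B (the rewrite author's own statement) =====
-- stated objective: alternative
-- what changed: B drops the running balance counter entirely: it enumerates only the odd candidate indices i (a prefix can balance only at odd i) and independently recounts '(' in p[:i+1], returning the first i with 2*count == i+1, instead of A's single fused counter loop.
-- outside the precondition, e.g. on get_balanced_index('('): A returns None, B returns None; on get_balanced_index('(('): A returns None, B returns None; on get_balanced_index(''): A returns None, B returns None
import Mathlib
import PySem

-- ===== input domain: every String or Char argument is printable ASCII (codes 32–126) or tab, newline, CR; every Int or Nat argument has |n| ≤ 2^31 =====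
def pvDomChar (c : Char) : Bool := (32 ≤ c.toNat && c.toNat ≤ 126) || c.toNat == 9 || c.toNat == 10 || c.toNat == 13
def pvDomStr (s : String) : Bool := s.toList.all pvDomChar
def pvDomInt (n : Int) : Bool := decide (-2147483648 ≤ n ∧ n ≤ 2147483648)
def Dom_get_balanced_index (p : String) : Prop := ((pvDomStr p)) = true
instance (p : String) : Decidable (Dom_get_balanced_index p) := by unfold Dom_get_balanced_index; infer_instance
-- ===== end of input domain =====

-- B drops A's running counter: it enumerates only the odd candidate indices and recounts
-- '(' in the prefix from scratch for each (objective: alternative algorithm, no speed claim).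


-- ===== PORT A =====
-- A's fused loop: update the counter, return the current index as soon as it is 0.
-- (When the loop falls off the end the Python returns None, which is outside Pre_; -1 here.)
def getBalLoop : List Char → Int → Int → Int
  | [], _, _ => -1
  | c :: rest, i, n =>
    let n' := if c = '(' then n + 1 else n - 1
    if n' = 0 then i else getBalLoop rest (i + 1) n'

def get_balanced_index (p : String) : Int :=
  getBalLoop p.toList 0 0

-- ===== PORT B =====
-- Source B's loop over range(1, len(p), 2); each step recounts '(' in p[:i+1] from scratch.
-- p.count('(', 0, i+1) has a 1-character needle, so it is the count of the char '(' in
-- the slice p[0:i+1] (exact: for single characters substring count = element count).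
def altScan (cs : List Char) : List Int → Int
  | [] => -1
  | i :: rest =>
    if 2 * ((PySem.List.slice cs none (some (i + 1))).count '(' : Int) = i + 1 then i
    else altScan cs rest

def get_balanced_index_alt (p : String) : Int :=
  altScan p.toList (PySem.List.pyRange 1 (p.toList.length : Int) 2)

-- ===== PRECONDITION & SPEC =====
-- Pre_ excludes exactly the inputs on which A falls off its loop and returns None (no
-- non-empty prefix with balance 0): None is not a value of the declared Int type.
def Pre_get_balanced_index (p : String) : Prop :=
  ∃ k < p.toList.length,
    (p.toList.take (k + 1)).foldl (fun n c => n + (if c = '(' then 1 else -1)) 0 = 0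
instance (p : String) : Decidable (Pre_get_balanced_index p) := by
  unfold Pre_get_balanced_index; infer_instance

def pvWitness_get_balanced_index : String := "()"

def Spec_get_balanced_index (p : String) (out : Int) : Prop := out = get_balanced_index_alt p
instance (p : String) (out : Int) : Decidable (Spec_get_balanced_index p out) := by
  unfold Spec_get_balanced_index; infer_instance

-- ===== CLAIM =====
def Claim_equal_get_balanced_index : Prop :=
  ∀ (p : String), Dom_get_balanced_index p → Pre_get_balanced_index p →
    Spec_get_balanced_index p (get_balanced_index p)

-- ===== LEMMAS AND PROOFS =====

-- range(a, b, 2) unfolds like a cons-list.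
lemma pyRange_two_nil (a b : Int) (h : b ≤ a) : PySem.List.pyRange a b 2 = [] := by
  rw [PySem.List.pyRange_of_pos a b (by norm_num)]
  simp [if_neg (not_lt.mpr h)]

lemma pyRange_two_cons (a b : Int) (h : a < b) :
    PySem.List.pyRange a b 2 = a :: PySem.List.pyRange (a + 2) b 2 := by
  rw [PySem.List.pyRange_of_pos a b (by norm_num),
      PySem.List.pyRange_of_pos (a + 2) b (by norm_num)]
  have hn : ((b - a + 2 - 1) / 2).toNat =
      (if a + 2 < b then ((b - (a + 2) + 2 - 1) / 2).toNat else 0) + 1 := by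
    split_ifs with h2
    · have : b - (a + 2) + 2 - 1 = (b - a + 2 - 1) - 2 := by ring
      rw [this]
      omega
    · omega
  rw [if_pos h, hn, List.range_succ_eq_map]
  simp [List.map_map, Function.comp_def]
  intro k _
  ring

-- Main correspondence: with pre already consumed (|pre| even), A's loop on the suffix
-- equals B's scan over the remaining odd candidate indices.
lemma main_aux : ∀ (N : Nat) (suf : List Char), suf.length = N → ∀ (pre : List Char),
    pre.length % 2 = 0 →
    getBalLoop suf (pre.length : Int) (2 * (pre.count '(' : Int) - pre.length) =
      altScan (pre ++ suf)
        (PySem.List.pyRange ((pre.length : Int) + 1) ((pre.length : Int) + suf.length) 2) := by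
  intro N
  induction N using Nat.strong_induction_on with
  | _ N ih =>
    intro suf hlen pre hpar
    rcases suf with _ | ⟨c1, _ | ⟨c2, rest⟩⟩
    · rw [pyRange_two_nil _ _ (by simp)]
      simp [getBalLoop, altScan]
    · have hne : ¬ ((if c1 = '(' then 2 * ((pre.count '(' : Int)) - (pre.length : Int) + 1
          else 2 * ((pre.count '(' : Int)) - (pre.length : Int) - 1) = 0) := by
        split_ifs <;> omega
      rw [pyRange_two_nil _ _ (by simp)]
      simp only [getBalLoop, altScan]
      simp [hne]
    · have hb : ((pre.length : Int)) + 1 <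
          (pre.length : Int) + ((c1 :: c2 :: rest).length : Int) := by
        simp
      rw [pyRange_two_cons _ _ hb]
      have hslice : PySem.List.slice (pre ++ c1 :: c2 :: rest) none
          (some (((pre.length : Int) + 1) + 1)) = pre ++ [c1, c2] := by
        have hcast : ((pre.length : Int) + 1) + 1 = ((pre.length + 2 : Nat) : Int) := by
          push_cast; ring
        rw [hcast, PySem.List.slice_to_natCast]
        rw [List.take_append]
        simp
      have hcnt : ((pre ++ [c1, c2]).count '(' : Int)
          = (pre.count '(' : Int) + (if c1 = '(' then 1 else 0)
            + (if c2 = '(' then 1 else 0) := by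
        simp [List.count_append, List.count_cons]
        split_ifs <;> push_cast <;> ring
      have hrec := ih rest.length (by simp at hlen; omega) rest rfl
        (pre ++ [c1, c2]) (by simp; omega)
      have harr : (pre ++ [c1, c2]) ++ rest = pre ++ c1 :: c2 :: rest := by simp
      have hL2 : (pre ++ [c1, c2]).length = pre.length + 2 := by simp
      rw [harr, hL2, hcnt] at hrec
      push_cast at hrec
      simp only [altScan, hslice, getBalLoop]
      rw [hcnt]
      simp only [List.length_cons]
      push_cast
      by_cases e1 : c1 = '(' <;> by_cases e2 : c2 = '(' <;>
        simp only [e1, e2, if_true, if_false] at hrec ⊢ <;>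
        split_ifs <;>
        first
          | rfl
          | (exfalso; omega)
          | (ring_nf at hrec ⊢; exact hrec)

-- ===== VERDICT =====
theorem get_balanced_index_spec : Claim_equal_get_balanced_index := by
  intro p _ _
  unfold Spec_get_balanced_index get_balanced_index get_balanced_index_alt
  have h := main_aux p.toList.length p.toList rfl [] (by simp)
  simpa using h
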